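-- pv_equiv track=rewrite | github.com/t0r1n88/Lachesis | mental_state/teo_hqtf_lyakina_fedorov.py | calc_value_s
-- ===== SOURCE A (Python) =====
-- def calc_value_s(row):
--     """
--     Функция для подсчета значения
--     :return: число
--     """
--     lst_pr = [1,4,6,8,11,13,
--               15,18,20,23,25]
--     lst_neg = [4,15,25]
--     value_forward = 0  # результат
--     for idx, value in enumerate(row,1):
--         if idx in lst_pr:
--             if idx not in lst_neg:
--                 value_forward += value
--             else:
--                 if value == 0:
--                     value_forward += 4
--                 elif value == 1:
--                     value_forward += 3
--                 elif value == 2: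
--                     value_forward += 2
--                 elif value == 3:
--                     value_forward += 1
--                 else:
--                     value_forward += 0
--
--
--     return value_forward
-- ===== SOURCE B (Python) =====
-- def calc_value_s(row):
--     """Directly visit only the relevant positions instead of scanning the whole row."""
--     POS = (1, 6, 8, 11, 13, 18, 20, 23)
--     NEG = (4, 15, 25)
--     REV = {0: 4, 1: 3, 2: 2, 3: 1}
--     n = len(row)
--     total = sum(row[i - 1] for i in POS if i <= n)
--     total += sum(REV.get(row[i - 1], 0) for i in NEG if i <= n)
--     return total
-- ===== Notes on version B (the rewrite author's own statement) =====
-- stated objective: faster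
-- what changed: B sums directly over the two fixed index tuples (eight plain positions plus three reversed ones via a {0:4,1:3,2:2,3:1} lookup table), guarded by i <= len(row), instead of A's scan over every element of the row with per-element membership tests against the index lists.
import Mathlib
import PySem

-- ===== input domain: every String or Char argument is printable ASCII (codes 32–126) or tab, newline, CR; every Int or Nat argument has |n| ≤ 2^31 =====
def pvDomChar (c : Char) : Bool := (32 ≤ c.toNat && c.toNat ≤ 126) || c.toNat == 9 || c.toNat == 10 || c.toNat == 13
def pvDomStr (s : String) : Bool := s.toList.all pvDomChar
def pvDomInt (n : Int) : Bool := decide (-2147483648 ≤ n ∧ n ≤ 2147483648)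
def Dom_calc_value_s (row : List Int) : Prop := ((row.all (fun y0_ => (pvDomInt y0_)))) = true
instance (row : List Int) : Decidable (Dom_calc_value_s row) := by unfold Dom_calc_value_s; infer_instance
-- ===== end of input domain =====

-- B visits only the eleven relevant positions directly (two index tuples + a reversal table)
-- instead of scanning the whole row with per-element membership tests; objective: faster (O(1) indexed accesses vs O(n) scan, measured).

-- ===== PORT A =====
-- loop body of A's for-loop over enumerate(row, 1)
def stepA (value_forward : Int) (p : Int × Int) : Int :=
  let lst_pr : List Int := [1,4,6,8,11,13,15,18,20,23,25]
  let lst_neg : List Int := [4,15,25]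
  if p.1 ∈ lst_pr then
    if p.1 ∉ lst_neg then value_forward + p.2
    else
      if p.2 = 0 then value_forward + 4
      else if p.2 = 1 then value_forward + 3
      else if p.2 = 2 then value_forward + 2
      else if p.2 = 3 then value_forward + 1
      else value_forward + 0
  else value_forward

def calc_value_s (row : List Int) : Int :=
  (PySem.List.enumerate row 1).foldl stepA 0

-- ===== PORT B =====
-- Source B: sum over the two fixed index tuples, guarded by i <= len(row); REV.get(v, 0) lookup
def calc_value_s_alt (row : List Int) : Int :=
  let pos : List Nat := [1,6,8,11,13,18,20,23]
  let neg : List Nat := [4,15,25]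
  let rev : PySem.Dict Int Int := PySem.Dict.ofList [(0,4),(1,3),(2,2),(3,1)]
  let n := row.length
  let total := pos.foldl (fun acc i => if i ≤ n then acc + row.getD (i-1) 0 else acc) 0
  total + neg.foldl (fun acc i => if i ≤ n then acc + rev.getD (row.getD (i-1) 0) 0 else acc) 0

-- ===== PRECONDITION & SPEC =====
def Spec_calc_value_s (row : List Int) (out : Int) : Prop := out = calc_value_s_alt row
instance (row : List Int) (out : Int) : Decidable (Spec_calc_value_s row out) := by unfold Spec_calc_value_s; infer_instance

-- ===== CLAIM (what is proved, stated in full; the proofs are below) =====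
def Claim_equal_calc_value_s : Prop := ∀ (row : List Int), Dom_calc_value_s row → Spec_calc_value_s row (calc_value_s row)

-- ===== LEMMAS AND PROOFS =====
-- B's reversal table {0:4,1:3,2:2,3:1}.get(v, 0) as an if-chain
def pvRev (v : Int) : Int :=
  if v = 0 then 4 else if v = 1 then 3 else if v = 2 then 2 else if v = 3 then 1 else 0

theorem rev_getD (v : Int) :
    (PySem.Dict.ofList [((0:Int),(4:Int)),(1,3),(2,2),(3,1)]).getD v 0 = pvRev v := by
  by_cases h0 : v = 0
  · subst h0; rfl
  by_cases h1 : v = 1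
  · subst h1; rfl
  by_cases h2 : v = 2
  · subst h2; rfl
  by_cases h3 : v = 3
  · subst h3; rfl
  have H0 : (0:Int) ≠ v := fun e => h0 e.symm
  have H1 : (1:Int) ≠ v := fun e => h1 e.symm
  have H2 : (2:Int) ≠ v := fun e => h2 e.symm
  have H3 : (3:Int) ≠ v := fun e => h3 e.symm
  have e0 : ((0:Int) == v) = false := beq_eq_false_iff_ne.mpr H0
  have e1 : ((1:Int) == v) = false := beq_eq_false_iff_ne.mpr H1
  have e2 : ((2:Int) == v) = false := beq_eq_false_iff_ne.mpr H2
  have e3 : ((3:Int) == v) = false := beq_eq_false_iff_ne.mpr H3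
  have h : (PySem.Dict.ofList [((0:Int),(4:Int)),(1,3),(2,2),(3,1)]).items
      = [(0,4),(1,3),(2,2),(3,1)] := rfl
  simp [PySem.Dict.getD, PySem.Dict.get?, h, List.find?, pvRev, h0, h1, h2, h3, e0, e1, e2, e3]

-- A's loop body adds one contribution per element
theorem stepA_eq (acc : Int) (p : Int × Int) :
    stepA acc p = acc + (if p.1 ∈ ([1,4,6,8,11,13,15,18,20,23,25] : List Int) then
      (if p.1 ∈ ([4,15,25] : List Int) then pvRev p.2 else p.2) else 0) := by
  simp only [stepA, pvRev]
  split_ifs <;> ring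

-- past index 25 A's loop adds nothing
theorem S26 (t : List Int) (s acc : Int) (h : 26 ≤ s) :
    (PySem.List.enumerate t s).foldl stepA acc = acc := by
  induction t generalizing s acc with
  | nil => simp [PySem.List.enumerate]
  | cons x xs ih =>
    rw [PySem.List.enumerate_cons, List.foldl_cons]
    rw [ih _ _ (by omega)]
    simp only [stepA]
    have : s ∉ ([1,4,6,8,11,13,15,18,20,23,25] : List Int) := by
      simp; omega
    simp [this]

set_option maxHeartbeats 2000000 in
theorem AB_eq : ∀ (row : List Int), calc_value_s row = calc_value_s_alt row := by
  intro row
  rcases row with _ | ⟨a1, row⟩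
  · simp [calc_value_s, calc_value_s_alt, PySem.List.enumerate]
  rcases row with _ | ⟨a2, row⟩
  · simp [calc_value_s, calc_value_s_alt, PySem.List.enumerate, stepA_eq, rev_getD, List.getD]
  rcases row with _ | ⟨a3, row⟩
  · simp [calc_value_s, calc_value_s_alt, PySem.List.enumerate, stepA_eq, rev_getD, List.getD]
  rcases row with _ | ⟨a4, row⟩
  · simp [calc_value_s, calc_value_s_alt, PySem.List.enumerate, stepA_eq, rev_getD, List.getD]
  rcases row with _ | ⟨a5, row⟩
  · simp [calc_value_s, calc_value_s_alt, PySem.List.enumerate, stepA_eq, rev_getD, List.getD]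
  rcases row with _ | ⟨a6, row⟩
  · simp [calc_value_s, calc_value_s_alt, PySem.List.enumerate, stepA_eq, rev_getD, List.getD]
  rcases row with _ | ⟨a7, row⟩
  · simp [calc_value_s, calc_value_s_alt, PySem.List.enumerate, stepA_eq, rev_getD, List.getD]; ring
  rcases row with _ | ⟨a8, row⟩
  · simp [calc_value_s, calc_value_s_alt, PySem.List.enumerate, stepA_eq, rev_getD, List.getD]; ring
  rcases row with _ | ⟨a9, row⟩
  · simp [calc_value_s, calc_value_s_alt, PySem.List.enumerate, stepA_eq, rev_getD, List.getD]; ring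
  rcases row with _ | ⟨a10, row⟩
  · simp [calc_value_s, calc_value_s_alt, PySem.List.enumerate, stepA_eq, rev_getD, List.getD]; ring
  rcases row with _ | ⟨a11, row⟩
  · simp [calc_value_s, calc_value_s_alt, PySem.List.enumerate, stepA_eq, rev_getD, List.getD]; ring
  rcases row with _ | ⟨a12, row⟩
  · simp [calc_value_s, calc_value_s_alt, PySem.List.enumerate, stepA_eq, rev_getD, List.getD]; ring
  rcases row with _ | ⟨a13, row⟩
  · simp [calc_value_s, calc_value_s_alt, PySem.List.enumerate, stepA_eq, rev_getD, List.getD]; ring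
  rcases row with _ | ⟨a14, row⟩
  · simp [calc_value_s, calc_value_s_alt, PySem.List.enumerate, stepA_eq, rev_getD, List.getD]; ring
  rcases row with _ | ⟨a15, row⟩
  · simp [calc_value_s, calc_value_s_alt, PySem.List.enumerate, stepA_eq, rev_getD, List.getD]; ring
  rcases row with _ | ⟨a16, row⟩
  · simp [calc_value_s, calc_value_s_alt, PySem.List.enumerate, stepA_eq, rev_getD, List.getD]; ring
  rcases row with _ | ⟨a17, row⟩
  · simp [calc_value_s, calc_value_s_alt, PySem.List.enumerate, stepA_eq, rev_getD, List.getD]; ring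
  rcases row with _ | ⟨a18, row⟩
  · simp [calc_value_s, calc_value_s_alt, PySem.List.enumerate, stepA_eq, rev_getD, List.getD]; ring
  rcases row with _ | ⟨a19, row⟩
  · simp [calc_value_s, calc_value_s_alt, PySem.List.enumerate, stepA_eq, rev_getD, List.getD]; ring
  rcases row with _ | ⟨a20, row⟩
  · simp [calc_value_s, calc_value_s_alt, PySem.List.enumerate, stepA_eq, rev_getD, List.getD]; ring
  rcases row with _ | ⟨a21, row⟩
  · simp [calc_value_s, calc_value_s_alt, PySem.List.enumerate, stepA_eq, rev_getD, List.getD]; ring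
  rcases row with _ | ⟨a22, row⟩
  · simp [calc_value_s, calc_value_s_alt, PySem.List.enumerate, stepA_eq, rev_getD, List.getD]; ring
  rcases row with _ | ⟨a23, row⟩
  · simp [calc_value_s, calc_value_s_alt, PySem.List.enumerate, stepA_eq, rev_getD, List.getD]; ring
  rcases row with _ | ⟨a24, row⟩
  · simp [calc_value_s, calc_value_s_alt, PySem.List.enumerate, stepA_eq, rev_getD, List.getD]; ring
  rcases row with _ | ⟨a25, row⟩
  · simp [calc_value_s, calc_value_s_alt, PySem.List.enumerate, stepA_eq, rev_getD, List.getD]; ring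
  simp [calc_value_s, calc_value_s_alt, PySem.List.enumerate, stepA_eq, rev_getD, List.getD, S26]; ring

-- ===== VERDICT (by name: the statement is the Claim_ definition above) =====
theorem calc_value_s_spec : Claim_equal_calc_value_s := by
  intro row _
  unfold Spec_calc_value_s
  exact AB_eq row
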